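-- pv_equiv track=rewrite | github.com/CuttingEEG/EEG101CommunityFramework | import_docx.py | clean_buffer
-- ===== SOURCE A (Python) =====
-- def clean_buffer(lines):
--     """
--     Post-process lines to merge metadata and inputs that were split by blank lines.
--     Also removes leading blank lines.
--     """
--     # Remove leading blank lines
--     while lines and lines[0].strip() == '':
--         lines.pop(0)
--
--     cleaned = []
--     i = 0
--     while i < len(lines):
--         line = lines[i]
--
--         # Helper to look ahead skipping blanks
--         def find_next_non_blank(start_idx):
--             k = start_idx
--             while k < len(lines) and lines[k].strip() == '':
--                 k += 1
--             if k < len(lines):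
--                 return k, lines[k]
--             return None, None
--
--         next_idx, next_line = find_next_non_blank(i + 1)
--
--         if next_idx:
--             # Merge /// details and type:
--             if '/// details' in line and 'type:' in next_line:
--                 cleaned.append(line)
--                 # Don't append next_line yet, let it be processed in next iteration
--                 # so it can be merged with open: if needed
--                 i = next_idx
--                 continue
--
--             # Merge type: and open:
--             if 'type:' in line and 'open:' in next_line:
--                 cleaned.append(line)
--                 cleaned.append(next_line)
--                 i = next_idx + 1
--                 continue
--
--             # Ensure blank line after metadata if followed by text
--             if ('type:' in line or 'open:' in line) and next_line.strip() != '' and not next_line.strip().startswith('open:') and not next_line.strip().startswith('///'):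
--                  cleaned.append(line)
--                  cleaned.append('') # Force blank line
--                  cleaned.append(next_line)
--                  i = next_idx + 1
--                  continue
--
--             # Ensure blank line after /// html | li
--             if '/// html' in line and 'li' in line:
--                  cleaned.append(line)
--                  if i + 1 < len(lines) and lines[i+1].strip() != '':
--                      cleaned.append('')
--                  i += 1
--                  continue
--
--             # Merge <input> or [cb-...] or [pledge_...] and following text
--             # Only if it is on its own line (which it is if we split it)
--             is_input = '<input' in line or '[cb-' in line or '[pledge_' in line
--             if is_input and next_line.strip() != '':
--                  # Check if it was split by us (i.e. there was a blank line)
--                  # If next_idx > i + 1, there was a blank line.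
--                  if next_idx > i + 1:
--                      cleaned.append(line)
--                      cleaned.append(next_line)
--                      i = next_idx + 1
--                      continue
--
--         cleaned.append(line)
--         i += 1
--     return cleaned
-- ===== SOURCE B (Python) =====
-- def clean_buffer(lines):
--     """
--     Post-process lines to merge metadata and inputs that were split by blank lines.
--     Also removes leading blank lines.
--     Return value only: does not mutate the argument (A pops leading blanks in place).
--     Single forward streaming pass: instead of looking ahead past blanks from each
--     position, keep the last pending non-blank line and the blank lines buffered
--     since it, and decide what to emit when the next non-blank line arrives.
--     """
--     out = []
--     prev = None      # pending non-blank line awaiting its next non-blank line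
--     blanks = []      # blank lines seen since prev
--     started = False  # False while still skipping leading blank lines
--     for x in lines:
--         if x.strip() == '':
--             if not started:
--                 continue
--             if prev is None:
--                 out.append(x)
--             else:
--                 blanks.append(x)
--             continue
--         started = True
--         if prev is None:
--             prev = x
--             continue
--         s = x.strip()
--         if '/// details' in prev and 'type:' in x:
--             out.append(prev)
--             blanks, prev = [], x
--         elif 'type:' in prev and 'open:' in x:
--             out += [prev, x]
--             blanks, prev = [], None
--         elif ('type:' in prev or 'open:' in prev) \
--                 and not s.startswith('open:') and not s.startswith('///'):
--             out += [prev, '', x]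
--             blanks, prev = [], None
--         elif '/// html' in prev and 'li' in prev:
--             out.append(prev)
--             if not blanks:
--                 out.append('')
--             out += blanks
--             blanks, prev = [], x
--         elif ('<input' in prev or '[cb-' in prev or '[pledge_' in prev) and blanks:
--             out += [prev, x]
--             blanks, prev = [], None
--         else:
--             out.append(prev)
--             out += blanks
--             blanks, prev = [], x
--     if prev is not None:
--         out.append(prev)
--         out += blanks
--     return out
-- ===== Notes on version B (the rewrite author's own statement) =====
-- stated objective: faster
-- what changed: B replaces A's indexed while-loop with forward lookahead (re-scanning past blank runs from each position, with repeated indexing) by a single streaming pass that buffers the pending non-blank line and the blanks after it and decides each merge when the next non-blank line arrives; B also does not mutate its argument.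
import Mathlib
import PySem

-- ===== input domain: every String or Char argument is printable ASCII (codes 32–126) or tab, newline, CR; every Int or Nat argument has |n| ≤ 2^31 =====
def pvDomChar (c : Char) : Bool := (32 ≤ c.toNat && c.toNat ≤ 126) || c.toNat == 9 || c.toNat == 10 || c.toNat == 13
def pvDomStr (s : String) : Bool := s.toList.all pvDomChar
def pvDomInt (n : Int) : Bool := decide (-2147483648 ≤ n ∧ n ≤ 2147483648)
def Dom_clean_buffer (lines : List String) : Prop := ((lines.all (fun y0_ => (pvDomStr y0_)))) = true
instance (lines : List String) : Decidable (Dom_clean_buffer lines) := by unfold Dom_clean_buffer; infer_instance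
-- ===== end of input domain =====

-- B replaces A's indexed lookahead loop by one streaming pass that buffers the pending
-- non-blank line and the blanks after it. Return value only: A pops leading blanks from
-- its argument in place, B does not mutate it.

-- ===== PORT A =====

-- A: while lines and lines[0].strip() == '': lines.pop(0)
def aPop : List String → List String
  | [] => []
  | l :: ls => if PySem.Str.strip l = "" then aPop ls else l :: ls

-- A: def find_next_non_blank(start_idx): scan forward past blanks
def aFind (lines : List String) (k : Nat) : Option (Nat × String) :=
  if h : k < lines.length then
    if PySem.Str.strip lines[k] = "" then aFind lines (k + 1)
    else some (k, lines[k])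
  else none
termination_by lines.length - k

-- A: the main while loop, branch for branch (fuel only makes the recursion
-- structural; each iteration moves i forward, so lines.length + 1 fuel is ample)
def aLoop (lines : List String) (cleaned : List String) (i : Nat) (fuel : Nat) : List String :=
  match fuel with
  | 0 => cleaned
  | fuel + 1 =>
    if i < lines.length then
      let line := lines[i]!
      match aFind lines (i + 1) with
      | some (j, nline) =>
        if j ≠ 0 then
          if PySem.Str.isIn "/// details" line && PySem.Str.isIn "type:" nline then
            aLoop lines (cleaned ++ [line]) j fuel
          else if PySem.Str.isIn "type:" line && PySem.Str.isIn "open:" nline then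
            aLoop lines (cleaned ++ [line, nline]) (j + 1) fuel
          else if (PySem.Str.isIn "type:" line || PySem.Str.isIn "open:" line)
              && (PySem.Str.strip nline != "")
              && !(PySem.Str.startswith (PySem.Str.strip nline) "open:")
              && !(PySem.Str.startswith (PySem.Str.strip nline) "///") then
            aLoop lines (cleaned ++ [line, "", nline]) (j + 1) fuel
          else if PySem.Str.isIn "/// html" line && PySem.Str.isIn "li" line then
            aLoop lines (cleaned ++ [line] ++
              (if decide (i + 1 < lines.length) && (PySem.Str.strip lines[i + 1]! != "")
               then [""] else [])) (i + 1) fuel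
          else if (PySem.Str.isIn "<input" line || PySem.Str.isIn "[cb-" line
              || PySem.Str.isIn "[pledge_" line) && (PySem.Str.strip nline != "") then
            if i + 1 < j then aLoop lines (cleaned ++ [line, nline]) (j + 1) fuel
            else aLoop lines (cleaned ++ [line]) (i + 1) fuel
          else aLoop lines (cleaned ++ [line]) (i + 1) fuel
        else aLoop lines (cleaned ++ [line]) (i + 1) fuel
      | none => aLoop lines (cleaned ++ [line]) (i + 1) fuel
    else cleaned

def clean_buffer (lines : List String) : List String :=
  aLoop (aPop lines) [] 0 ((aPop lines).length + 1)

-- ===== PORT B =====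

-- B: the body of the 'for x in lines' loop; state = (out, prev, blanks, started)
def bStep (st : List String × Option String × List String × Bool) (x : String) :
    List String × Option String × List String × Bool :=
  match st with
  | (out, prev, blanks, started) =>
    if PySem.Str.strip x = "" then
      if started = false then (out, prev, blanks, started)
      else
        match prev with
        | none => (out ++ [x], none, blanks, started)
        | some p => (out, some p, blanks ++ [x], started)
    else
      match prev with
      | none => (out, some x, blanks, true)
      | some p =>
        let s := PySem.Str.strip x
        if PySem.Str.isIn "/// details" p && PySem.Str.isIn "type:" x then
          (out ++ [p], some x, [], true)
        else if PySem.Str.isIn "type:" p && PySem.Str.isIn "open:" x then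
          (out ++ [p, x], none, [], true)
        else if (PySem.Str.isIn "type:" p || PySem.Str.isIn "open:" p)
            && !(PySem.Str.startswith s "open:") && !(PySem.Str.startswith s "///") then
          (out ++ [p, "", x], none, [], true)
        else if PySem.Str.isIn "/// html" p && PySem.Str.isIn "li" p then
          (out ++ [p] ++ (if blanks.isEmpty then [""] else []) ++ blanks, some x, [], true)
        else if (PySem.Str.isIn "<input" p || PySem.Str.isIn "[cb-" p
            || PySem.Str.isIn "[pledge_" p) && !blanks.isEmpty then
          (out ++ [p, x], none, [], true)
        else
          (out ++ [p] ++ blanks, some x, [], true)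

-- B: fold the loop body over the lines, then flush the pending line and its blanks
def clean_buffer_alt (lines : List String) : List String :=
  match lines.foldl bStep ([], none, [], false) with
  | (out, some p, blanks, _) => out ++ [p] ++ blanks
  | (out, none, _, _) => out

-- ===== PRECONDITION & SPEC =====
def Spec_clean_buffer (lines : List String) (out : List String) : Prop := out = clean_buffer_alt lines
instance (lines : List String) (out : List String) : Decidable (Spec_clean_buffer lines out) := by unfold Spec_clean_buffer; infer_instance

-- ===== CLAIM (what is proved, stated in full; the proofs are below) =====
def Claim_equal_clean_buffer : Prop := ∀ (lines : List String), Dom_clean_buffer lines → Spec_clean_buffer lines (clean_buffer lines)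

-- ===== LEMMAS AND PROOFS =====

-- blank test as a Bool predicate (proof-only shorthand)
def pvB (l : String) : Bool := PySem.Str.strip l == ""

-- flush of B's final state (proof-only shorthand for clean_buffer_alt's match)
def bFlush (st : List String × Option String × List String × Bool) : List String :=
  match st with
  | (out, some p, blanks, _) => out ++ [p] ++ blanks
  | (out, none, _, _) => out

theorem clean_buffer_alt_eq (lines : List String) :
    clean_buffer_alt lines = bFlush (lines.foldl bStep ([], none, [], false)) := by
  unfold clean_buffer_alt bFlush
  rfl

theorem blank_all_space (x : String) (hx : PySem.Str.strip x = "") :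
    ∀ c ∈ x.toList, PySem.Chars.isspace c = true := by
  have h : PySem.Chars.strip x.toList = [] := by
    have h1 := PySem.Str.toList_strip x
    rw [hx] at h1
    exact h1.symm
  unfold PySem.Chars.strip PySem.Chars.rstrip PySem.Chars.lstrip at h
  have h2 : List.dropWhile PySem.Chars.isspace
      ((List.dropWhile PySem.Chars.isspace x.toList).reverse) = [] := by
    simpa using congrArg List.reverse h
  have h3 : ∀ c ∈ List.dropWhile PySem.Chars.isspace x.toList, PySem.Chars.isspace c = true := by
    intro c hc
    exact (List.dropWhile_eq_nil_iff.mp h2) c (by simpa using hc)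
  intro c hc
  rw [← List.takeWhile_append_dropWhile (p := PySem.Chars.isspace) (l := x.toList)] at hc
  rcases List.mem_append.mp hc with h4 | h4
  · exact List.mem_takeWhile_imp h4
  · exact h3 c h4

theorem isIn_false_of_blank (x sub : String) (c : Char) (hc : c ∈ sub.toList)
    (hcs : PySem.Chars.isspace c = false) (hx : PySem.Str.strip x = "") :
    PySem.Str.isIn sub x = false := by
  by_contra h
  have ht : PySem.Str.isIn sub x = true := by simpa using h
  have hinf := (PySem.Str.isIn_iff_infix _ _).mp ht
  have hcx : c ∈ x.toList := hinf.subset hc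
  have := blank_all_space x hx c hcx
  rw [hcs] at this
  cases this

theorem noTok (x : String) (hx : PySem.Str.strip x = "") :
    PySem.Str.isIn "/// details" x = false ∧ PySem.Str.isIn "type:" x = false ∧
    PySem.Str.isIn "open:" x = false ∧ PySem.Str.isIn "/// html" x = false ∧
    PySem.Str.isIn "li" x = false ∧ PySem.Str.isIn "<input" x = false ∧
    PySem.Str.isIn "[cb-" x = false ∧ PySem.Str.isIn "[pledge_" x = false :=
  ⟨isIn_false_of_blank x _ '/' (by decide) (by decide) hx,
   isIn_false_of_blank x _ 't' (by decide) (by decide) hx,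
   isIn_false_of_blank x _ 'o' (by decide) (by decide) hx,
   isIn_false_of_blank x _ '/' (by decide) (by decide) hx,
   isIn_false_of_blank x _ 'l' (by decide) (by decide) hx,
   isIn_false_of_blank x _ '<' (by decide) (by decide) hx,
   isIn_false_of_blank x _ '[' (by decide) (by decide) hx,
   isIn_false_of_blank x _ '[' (by decide) (by decide) hx⟩

theorem drop_len_takeWhile {α : Type} (p : α → Bool) (xs : List α) :
    xs.drop (xs.takeWhile p).length = xs.dropWhile p := by
  induction xs with
  | nil => rfl
  | cons a t ih =>
    by_cases hp : p a
    · simp [hp, ih]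
    · simp [hp]

theorem dropWhile_head_false {α : Type} (p : α → Bool) (xs : List α) (y : α) (r : List α)
    (h : xs.dropWhile p = y :: r) : p y = false := by
  induction xs with
  | nil => cases h
  | cons a t ih =>
    by_cases hp : p a
    · rw [List.dropWhile_cons, if_pos hp] at h; exact ih h
    · rw [List.dropWhile_cons, if_neg hp] at h
      cases h
      simpa using hp

theorem aFind_eq (lines : List String) (k : Nat) :
    aFind lines k = (match (lines.drop k).dropWhile pvB with
      | [] => none
      | y :: _ => some (k + ((lines.drop k).takeWhile pvB).length, y)) := by
  induction k using aFind.induct lines with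
  | case1 k hk hb ih =>
    have hpb : pvB lines[k] = true := by simp [pvB, hb]
    rw [aFind, dif_pos hk, if_pos hb, ih, List.drop_eq_getElem_cons hk,
        List.dropWhile_cons, if_pos hpb, List.takeWhile_cons, if_pos hpb]
    cases hd : (lines.drop (k + 1)).dropWhile pvB with
    | nil => rfl
    | cons y r => simp; omega
  | case2 k hk hb =>
    have hpb : pvB lines[k] = false := by simp [pvB, hb]
    rw [aFind, dif_pos hk, if_neg hb, List.drop_eq_getElem_cons hk,
        List.dropWhile_cons, if_neg (by simp [hpb]), List.takeWhile_cons, if_neg (by simp [hpb])]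
    simp
  | case3 k hk =>
    rw [aFind, dif_neg hk, List.drop_of_length_le (by omega)]
    rfl

-- folding B's step over a run of blank lines, pending line present: they are buffered
theorem foldB_blanks_some (t : List String) (ht : ∀ l ∈ t, pvB l = true) :
    ∀ (out bl : List String) (p : String),
      List.foldl bStep (out, some p, bl, true) t = (out, some p, bl ++ t, true) := by
  induction t with
  | nil => intro out bl p; simp
  | cons x r ih =>
    intro out bl p
    have hx : PySem.Str.strip x = "" := by
      have := ht x (by simp); simpa [pvB] using this
    rw [List.foldl_cons]
    show List.foldl bStep (bStep (out, some p, bl, true) x) r = _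
    rw [show bStep (out, some p, bl, true) x = (out, some p, bl ++ [x], true) by
      simp [bStep, hx]]
    rw [ih (fun l hl => ht l (by simp [hl])) out (bl ++ [x]) p]
    simp

-- folding B's step over a run of blank lines, no pending line: they are emitted
theorem foldB_blanks_none (t : List String) (ht : ∀ l ∈ t, pvB l = true) :
    ∀ (out bl : List String),
      List.foldl bStep (out, none, bl, true) t = (out ++ t, none, bl, true) := by
  induction t with
  | nil => intro out bl; simp
  | cons x r ih =>
    intro out bl
    have hx : PySem.Str.strip x = "" := by
      have := ht x (by simp); simpa [pvB] using this
    rw [List.foldl_cons]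
    show List.foldl bStep (bStep (out, none, bl, true) x) r = _
    rw [show bStep (out, none, bl, true) x = (out ++ [x], none, bl, true) by
      simp [bStep, hx]]
    rw [ih (fun l hl => ht l (by simp [hl])) (out ++ [x]) bl]
    simp

-- skipping the leading blank lines: started=false over lines ~ started=true over aPop lines
theorem foldB_aPop (ls : List String) :
    ∀ out : List String,
      bFlush (List.foldl bStep (out, none, [], false) ls)
        = bFlush (List.foldl bStep (out, none, [], true) (aPop ls)) := by
  induction ls with
  | nil => intro out; rfl
  | cons x r ih =>
    intro out
    by_cases hx : PySem.Str.strip x = ""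
    · rw [show aPop (x :: r) = aPop r by rw [aPop, if_pos hx]]
      rw [List.foldl_cons,
          show bStep (out, none, [], false) x = (out, none, [], false) by simp [bStep, hx]]
      exact ih out
    · rw [show aPop (x :: r) = x :: r by rw [aPop, if_neg hx]]
      rw [List.foldl_cons, List.foldl_cons,
          show bStep (out, none, ([] : List String), false) x = (out, some x, [], true) by
            simp [bStep, hx],
          show bStep (out, none, ([] : List String), true) x = (out, some x, [], true) by
            simp [bStep, hx]]

-- B's step on a non-blank line with no pending line
theorem bStep_none_eq (out bl : List String) (x : String) (hx : ¬ PySem.Str.strip x = "") :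
    bStep (out, none, bl, true) x = (out, some x, bl, true) := by
  simp only [bStep]
  rw [if_neg hx]

-- B's step on a non-blank line with a pending line, branch chain exposed
theorem bStep_some_eq (out bl : List String) (p x : String) (hx : ¬ PySem.Str.strip x = "") :
    bStep (out, some p, bl, true) x =
      (if PySem.Str.isIn "/// details" p && PySem.Str.isIn "type:" x then
        (out ++ [p], some x, [], true)
      else if PySem.Str.isIn "type:" p && PySem.Str.isIn "open:" x then
        (out ++ [p, x], none, [], true)
      else if (PySem.Str.isIn "type:" p || PySem.Str.isIn "open:" p)
          && !(PySem.Str.startswith (PySem.Str.strip x) "open:")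
          && !(PySem.Str.startswith (PySem.Str.strip x) "///") then
        (out ++ [p, "", x], none, [], true)
      else if PySem.Str.isIn "/// html" p && PySem.Str.isIn "li" p then
        (out ++ [p] ++ (if bl.isEmpty then [""] else []) ++ bl, some x, [], true)
      else if (PySem.Str.isIn "<input" p || PySem.Str.isIn "[cb-" p
          || PySem.Str.isIn "[pledge_" p) && !bl.isEmpty then
        (out ++ [p, x], none, [], true)
      else
        (out ++ [p] ++ bl, some x, [], true)) := by
  simp only [bStep]
  rw [if_neg hx]

theorem getBang_of_drop (lines : List String) (n : Nat) (y : String) (r : List String)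
    (h : lines.drop n = y :: r) : lines[n]! = y := by
  have hn : n < lines.length := by
    by_contra hc
    rw [List.drop_of_length_le (by omega)] at h
    cases h
  rw [getElem!_pos lines n hn]
  have h2 := List.drop_eq_getElem_cons hn
  rw [h2] at h
  cases h
  rfl

-- the main correspondence: A's indexed loop from i = B's fold over the remaining lines
theorem main_eq (lines : List String) :
    ∀ (fuel i : Nat), lines.length - i < fuel → ∀ acc : List String,
      aLoop lines acc i fuel = bFlush (List.foldl bStep (acc, none, [], true) (lines.drop i)) := by
  intro fuel
  induction fuel with
  | zero => intro i h; omega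
  | succ fuel ih =>
    intro i hfi acc
    by_cases hi : i < lines.length
    case neg =>
      rw [aLoop, if_neg hi, List.drop_of_length_le (by omega)]
      rfl
    case pos =>
    have hline : lines[i]! = lines[i] := getElem!_pos lines i hi
    have hdropi : lines.drop i = lines[i] :: lines.drop (i + 1) := List.drop_eq_getElem_cons hi
    by_cases hb : PySem.Str.strip lines[i] = ""
    · -- blank current line: A appends it (no branch can fire), B emits it
      obtain ⟨h1, h2, h3, h4, h5, h6, h7, h8⟩ := noTok lines[i] hb
      simp at h1 h2 h3 h4 h6 h7 h8
      have hstep : aLoop lines acc i (fuel + 1) = aLoop lines (acc ++ [lines[i]]) (i + 1) fuel := by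
        rw [aLoop, if_pos hi]
        cases hf : aFind lines (i + 1) with
        | none => rw [hline]
        | some p =>
          obtain ⟨j, nline⟩ := p
          by_cases hj : j ≠ 0
          · simp [hline, hj, h1, h2, h3, h4, h6, h7, h8]
          · simp [hline, hj]
      rw [hstep, ih (i + 1) (by omega) (acc ++ [lines[i]]), hdropi, List.foldl_cons,
          show bStep (acc, none, [], true) lines[i] = (acc ++ [lines[i]], none, [], true) by
            simp [bStep, hb]]
    · -- non-blank current line
      set xs := lines.drop (i + 1) with hxs
      set t := xs.takeWhile pvB with htdef
      have ht : ∀ l ∈ t, pvB l = true := fun l hl => List.mem_takeWhile_imp hl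
      have hxst : t ++ xs.dropWhile pvB = xs := List.takeWhile_append_dropWhile
      have hBfirst : bStep (acc, none, [], true) lines[i] = (acc, some lines[i], [], true) := by
        simp [bStep, hb]
      have hfind := aFind_eq lines (i + 1)
      cases hd : xs.dropWhile pvB with
      | nil =>
        -- nothing non-blank follows: A appends the line then each blank; B flushes them
        have hxseq : t = xs := by rw [← hxst, hd, List.append_nil]
        have hxsb : ∀ l ∈ xs, pvB l = true := by rw [← hxseq]; exact ht
        rw [aLoop, if_pos hi, show aFind lines (i + 1) = none by rw [hfind, ← hxs, hd]]
        simp only []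
        rw [hline, ih (i + 1) (by omega) (acc ++ [lines[i]]), ← hxs,
            foldB_blanks_none xs hxsb (acc ++ [lines[i]]) [],
            hdropi, List.foldl_cons, hBfirst, foldB_blanks_some xs hxsb acc [] lines[i]]
        simp [bFlush]
      | cons y d' =>
        have hy : pvB y = false := dropWhile_head_false pvB xs y d' hd
        have hyb : ¬ PySem.Str.strip y = "" := by simpa [pvB] using hy
        have hynb : (PySem.Str.strip y != "") = true := by simp [hyb]
        have hjdef : aFind lines (i + 1) = some (i + 1 + t.length, y) := by
          rw [hfind, ← hxs, hd]
        have hdropj : lines.drop (i + 1 + t.length) = y :: d' := by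
          rw [← List.drop_drop (i := t.length) (j := i + 1), ← hxs,
              htdef, drop_len_takeWhile, hd]
        have hdropj1 : lines.drop (i + 1 + t.length + 1) = d' := by
          rw [← List.drop_drop (i := 1) (j := i + 1 + t.length),
              hdropj, List.drop_one, List.tail_cons]
        have hlen : i + 1 + t.length < lines.length := by
          have : lines.length ≤ i + 1 + t.length → lines.drop (i + 1 + t.length) = [] :=
            fun h => List.drop_of_length_le h
          by_contra hc
          rw [this (by omega)] at hdropj
          cases hdropj
        -- B side: fold = fold over d' after the pending line, the blanks, and y
        have hBside : List.foldl bStep (acc, none, [], true) (lines.drop i)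
            = List.foldl bStep (bStep (acc, some lines[i], t, true) y) d' := by
          rw [hdropi, List.foldl_cons, hBfirst, ← hxst, hd, List.foldl_append,
              foldB_blanks_some t ht acc [] lines[i], List.foldl_cons]
          simp
        -- pad agreement for the html branch
        have hpad : (if decide (i + 1 < lines.length) && (PySem.Str.strip lines[i + 1]! != "")
              then [""] else ([] : List String)) = (if t.isEmpty then [""] else []) := by
          cases htc : t with
          | nil =>
            have hdr : lines.drop (i + 1) = y :: d' := by
              rw [← hxs, ← hxst, hd, htc, List.nil_append]
            have hget : lines[i + 1]! = y := getBang_of_drop lines (i + 1) y d' hdr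
            rw [hget]
            simp [hyb, show i + 1 < lines.length by omega]
          | cons b t' =>
            have hbb : PySem.Str.strip b = "" := by
              have := ht b (by rw [htc]; simp)
              simpa [pvB] using this
            have hdr : lines.drop (i + 1) = b :: (t' ++ y :: d') := by
              rw [← hxs, ← hxst, hd, htc, List.cons_append]
            have hget : lines[i + 1]! = b := getBang_of_drop lines (i + 1) b _ hdr
            rw [hget]
            simp [hbb]
        -- A side: open the loop at the found pair, then decide branch by branch
        rw [aLoop, if_pos hi, hjdef]
        simp only []
        rw [if_pos (by omega : ¬ i + 1 + t.length = 0), hline, hBside,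
            bStep_some_eq acc t lines[i] y hyb]
        by_cases hc1 : (PySem.Str.isIn "/// details" lines[i] && PySem.Str.isIn "type:" y) = true
        · rw [if_pos hc1, if_pos hc1, ih (i + 1 + t.length) (by omega) (acc ++ [lines[i]]), hdropj,
              List.foldl_cons, bStep_none_eq (acc ++ [lines[i]]) [] y hyb]
        rw [if_neg hc1, if_neg hc1]
        by_cases hc2 : (PySem.Str.isIn "type:" lines[i] && PySem.Str.isIn "open:" y) = true
        · rw [if_pos hc2, if_pos hc2,
              ih (i + 1 + t.length + 1) (by omega) (acc ++ [lines[i], y]), hdropj1]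
        rw [if_neg hc2, if_neg hc2]
        by_cases hc3 : ((PySem.Str.isIn "type:" lines[i] || PySem.Str.isIn "open:" lines[i])
            && !(PySem.Str.startswith (PySem.Str.strip y) "open:")
            && !(PySem.Str.startswith (PySem.Str.strip y) "///")) = true
        · rw [if_pos (by rw [hynb, Bool.and_true]; exact hc3), if_pos hc3,
              ih (i + 1 + t.length + 1) (by omega) (acc ++ [lines[i], "", y]), hdropj1]
        rw [if_neg (by rw [hynb, Bool.and_true]; exact hc3), if_neg hc3]
        by_cases hc4 : (PySem.Str.isIn "/// html" lines[i] && PySem.Str.isIn "li" lines[i]) = true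
        · rw [if_pos hc4, if_pos hc4, ih (i + 1) (by omega) _, ← hxs, ← hxst, hd,
              List.foldl_append, foldB_blanks_none t ht _ [], List.foldl_cons,
              bStep_none_eq _ [] y hyb, hpad]
        rw [if_neg hc4, if_neg hc4]
        by_cases hc5 : (PySem.Str.isIn "<input" lines[i] || PySem.Str.isIn "[cb-" lines[i]
            || PySem.Str.isIn "[pledge_" lines[i]) = true
        · rw [if_pos (by rw [hc5, hynb]; rfl)]
          cases htc : t with
          | nil =>
            rw [if_neg (show ¬ i + 1 < i + 1 + ([] : List String).length by simp),
                if_neg (show ¬ ((PySem.Str.isIn "<input" lines[i] || PySem.Str.isIn "[cb-" lines[i]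
                  || PySem.Str.isIn "[pledge_" lines[i]) && !([] : List String).isEmpty) = true by
                  simp),
                ih (i + 1) (by omega) (acc ++ [lines[i]]), ← hxs, ← hxst, hd, htc,
                List.nil_append, List.foldl_cons, bStep_none_eq (acc ++ [lines[i]]) [] y hyb]
            simp
          | cons b t' =>
            rw [if_pos (show i + 1 < i + 1 + (b :: t').length by simp),
                if_pos (show ((PySem.Str.isIn "<input" lines[i] || PySem.Str.isIn "[cb-" lines[i]
                  || PySem.Str.isIn "[pledge_" lines[i]) && !((b :: t').isEmpty)) = true by
                  rw [hc5]; rfl),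
                ih (i + 1 + (b :: t').length + 1) (by omega) (acc ++ [lines[i], y]), ← htc,
                hdropj1]
        · rw [if_neg (show ¬ ((PySem.Str.isIn "<input" lines[i] || PySem.Str.isIn "[cb-" lines[i]
                || PySem.Str.isIn "[pledge_" lines[i]) && (PySem.Str.strip y != "")) = true by
                rw [hynb, Bool.and_true]; exact hc5),
              if_neg (show ¬ ((PySem.Str.isIn "<input" lines[i] || PySem.Str.isIn "[cb-" lines[i]
                || PySem.Str.isIn "[pledge_" lines[i]) && !t.isEmpty) = true by
                intro hcontra
                exact hc5 (by
                  rcases (Bool.and_eq_true _ _).mp hcontra with ⟨ha, _⟩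
                  exact ha)),
              ih (i + 1) (by omega) (acc ++ [lines[i]]), ← hxs, ← hxst, hd,
              List.foldl_append, foldB_blanks_none t ht _ [], List.foldl_cons,
              bStep_none_eq (acc ++ [lines[i]] ++ t) [] y hyb]

-- ===== VERDICT (by name: the statement is the Claim_ definition above) =====
theorem clean_buffer_spec : Claim_equal_clean_buffer := by
  intro lines _
  unfold Spec_clean_buffer clean_buffer
  rw [clean_buffer_alt_eq, foldB_aPop lines [],
      main_eq (aPop lines) ((aPop lines).length + 1) 0 (by omega) []]
  rfl
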